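-- pv_equiv track=rewrite | github.com/jaredap1995/LeetCode | Python/Hard/graph/allPeoplesWithSecret.py | solution
-- ===== SOURCE A (Python) =====
-- import collections
-- import heapq
--
-- def solution(n,meetings,firstPerson):
--     graph = collections.defaultdict(list)
--     for n1,n2,time in meetings:
--         graph[n1].append((n2, time))
--         graph[n2].append((n1,time))
--
--     heap = [(0,0), (0,firstPerson)]
--     res = set()
--
--     while heap:
--         time, cur = heapq.heappop(heap)
--
--         if cur not in res:
--             res.add(cur)
--         else:
--             continue
--
--         for neighbor, meetingTime in graph[cur]:
--             if meetingTime >= time: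
--                 heapq.heappush(heap, (meetingTime, neighbor))
--
--     return res
-- ===== SOURCE B (Python) =====
-- def solution(n, meetings, firstPerson):
--     # Worklist closure over (time, person) states instead of a time-ordered heap:
--     # a state (t, x) means "x can hold the secret at time t"; close the seed states
--     # under "x meets y at t2 >= t", then project onto the people.
--     states = {(0, 0), (0, firstPerson)}
--     queue = [(0, 0), (0, firstPerson)]
--
--     def push(s):
--         if s not in states:
--             states.add(s)
--             queue.append(s)
--
--     while queue:
--         t, x = queue.pop(0)
--         for a, b, t2 in meetings:
--             if t2 >= t:
--                 if a == x:
--                     push((t2, b))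
--                 if b == x:
--                     push((t2, a))
--     return {p for _, p in states}
-- ===== Notes on version B (the rewrite author's own statement) =====
-- stated objective: alternative
-- what changed: Replaces the heap-ordered Dijkstra-style spread (priority queue keyed by time, visited-person set) with an unordered worklist closure over (time, person) states that rescans the meeting list, then projects the closed state set onto people.
import Mathlib
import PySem

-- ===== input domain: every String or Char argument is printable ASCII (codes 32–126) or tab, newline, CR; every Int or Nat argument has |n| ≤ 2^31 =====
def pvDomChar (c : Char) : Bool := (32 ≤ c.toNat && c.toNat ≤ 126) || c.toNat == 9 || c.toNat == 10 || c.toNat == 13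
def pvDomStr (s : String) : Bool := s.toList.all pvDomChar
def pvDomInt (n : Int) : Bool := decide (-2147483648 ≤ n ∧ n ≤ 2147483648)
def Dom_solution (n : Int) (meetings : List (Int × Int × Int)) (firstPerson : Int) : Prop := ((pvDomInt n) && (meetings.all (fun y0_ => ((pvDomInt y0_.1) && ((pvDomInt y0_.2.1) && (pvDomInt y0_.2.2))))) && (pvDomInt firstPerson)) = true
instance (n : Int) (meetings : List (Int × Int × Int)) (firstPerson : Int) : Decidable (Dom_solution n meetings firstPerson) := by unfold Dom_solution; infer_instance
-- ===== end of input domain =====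

-- B replaces A's time-ordered heap walk (Dijkstra-style, visited-person set) by an unordered
-- worklist closure over (time, person) states; same return value (objective: alternative).
-- Python returns a SET; its iteration order is unobservable, so both ports return the set's
-- elements in ascending order (the canonical List Int for a Python set of ints).

-- ===== PORT A =====
-- graph = collections.defaultdict(list); for n1, n2, time in meetings: append both directions
def stepA (g : PySem.Dict Int (List (Int × Int))) (e : Int × Int × Int) :
    PySem.Dict Int (List (Int × Int)) :=
  let g1 := g.insert e.1 (g.getD e.1 [] ++ [(e.2.1, e.2.2)])
  g1.insert e.2.1 (g1.getD e.2.1 [] ++ [(e.1, e.2.2)])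

def buildGraphA (meetings : List (Int × Int × Int)) : PySem.Dict Int (List (Int × Int)) :=
  meetings.foldl stepA PySem.Dict.empty

-- heapq is modelled value-exactly by a list kept sorted by the pair (time, person):
-- heappush inserts in order, heappop takes the head, the minimum pair — exactly the
-- value Python's heappop returns (pairs of ints are totally ordered, so the popped
-- VALUE does not depend on the heap's internal layout).
def hpush : List (Int × Int) → (Int × Int) → List (Int × Int)
  | [], p => [p]
  | q :: hs, p =>
    if p.1 < q.1 ∨ (p.1 = q.1 ∧ p.2 < q.2) then p :: q :: hs else q :: hpush hs p

-- for neighbor, meetingTime in graph[cur]: if meetingTime >= time: heappush(heap, (meetingTime, neighbor))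
def pushAll (time : Int) (hs : List (Int × Int)) (adj : List (Int × Int)) : List (Int × Int) :=
  adj.foldl (fun h nb => if time ≤ nb.2 then hpush h (nb.2, nb.1) else h) hs

-- while heap: time, cur = heappop(heap); if cur not in res: res.add(cur) … else: continue
-- (fuel only bounds the number of pops; 4*|meetings|+3 provably suffices, see loopA_complete)
def loopA (g : PySem.Dict Int (List (Int × Int))) :
    Nat → List (Int × Int) → PySem.Set Int → PySem.Set Int
  | 0, _, res => res
  | _ + 1, [], res => res
  | fuel + 1, (time, cur) :: hs, res =>
    if cur ∉ res then
      loopA g fuel (pushAll time hs (g.getD cur [])) (res.add cur)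
    else
      loopA g fuel hs res

def solution (n : Int) (meetings : List (Int × Int × Int)) (firstPerson : Int) : List Int :=
  let g := buildGraphA meetings
  let heap0 := hpush (hpush [] (0, 0)) (0, firstPerson)
  let res := loopA g (4 * meetings.length + 3) heap0 PySem.Set.empty
  PySem.List.sorted res (fun x => x) false

-- ===== PORT B =====
-- def push(s): if s not in states: states.add(s); queue.append(s)
def addState (acc : PySem.Set (Int × Int) × List (Int × Int)) (s : Int × Int) :
    PySem.Set (Int × Int) × List (Int × Int) :=
  if s ∉ acc.1 then (acc.1.add s, acc.2 ++ [s]) else acc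

-- one meeting scanned from the popped state (t, x):
-- if t2 >= t: if a == x: push((t2, b)); if b == x: push((t2, a))
def scanStep (t x : Int) (acc : PySem.Set (Int × Int) × List (Int × Int)) (e : Int × Int × Int) :
    PySem.Set (Int × Int) × List (Int × Int) :=
  if t ≤ e.2.2 then
    let acc1 := if e.1 = x then addState acc (e.2.2, e.2.1) else acc
    if e.2.1 = x then addState acc1 (e.2.2, e.1) else acc1
  else acc

-- while queue: t, x = queue.pop(0); for a, b, t2 in meetings: …
-- (fuel only bounds the number of pops; 4*|meetings|+6 provably suffices, see loopB_closed)
def loopB (ms : List (Int × Int × Int)) :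
    Nat → PySem.Set (Int × Int) → List (Int × Int) → PySem.Set (Int × Int)
  | 0, states, _ => states
  | _ + 1, states, [] => states
  | fuel + 1, states, (t, x) :: rest =>
    let p := ms.foldl (scanStep t x) (states, rest)
    loopB ms fuel p.1 p.2

def solution_alt (n : Int) (meetings : List (Int × Int × Int)) (firstPerson : Int) : List Int :=
  let states := loopB meetings (4 * meetings.length + 6)
      (PySem.Set.ofList [((0 : Int), (0 : Int)), ((0 : Int), firstPerson)])
      [((0 : Int), (0 : Int)), ((0 : Int), firstPerson)]
  PySem.List.sorted (PySem.Set.ofList (states.map (fun s => s.2))) (fun x => x) false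

-- ===== PRECONDITION & SPEC =====
def Spec_solution (n : Int) (meetings : List (Int × Int × Int)) (firstPerson : Int) (out : List Int) : Prop := out = solution_alt n meetings firstPerson
instance (n : Int) (meetings : List (Int × Int × Int)) (firstPerson : Int) (out : List Int) : Decidable (Spec_solution n meetings firstPerson out) := by unfold Spec_solution; infer_instance

-- ===== CLAIM (what is proved, stated in full; the proofs are below) =====
def Claim_equal_solution : Prop := ∀ (n : Int) (meetings : List (Int × Int × Int)) (firstPerson : Int), Dom_solution n meetings firstPerson → Spec_solution n meetings firstPerson (solution n meetings firstPerson)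

-- ===== LEMMAS AND PROOFS =====

-- (x, y, t) is an (undirected) meeting of the input list
def edgeAdj (ms : List (Int × Int × Int)) (x y t : Int) : Prop :=
  (x, y, t) ∈ ms ∨ (y, x, t) ∈ ms

-- time-monotone meeting chains: RF ms (t, x) (t', y) = "starting from x holding the secret at
-- time t, y can hold it at time t'".  Both programs compute the people reachable this way
-- from (0, 0) and (0, firstPerson).
inductive RF (ms : List (Int × Int × Int)) : Int × Int → Int × Int → Prop
  | refl (s : Int × Int) : RF ms s s
  | head {t x t' y : Int} {u : Int × Int} :
      edgeAdj ms x y t' → t ≤ t' → RF ms (t', y) u → RF ms (t, x) u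

def Good (ms : List (Int × Int × Int)) (f : Int) (s : Int × Int) : Prop :=
  RF ms (0, 0) s ∨ RF ms (0, f) s

theorem RF_snoc {ms : List (Int × Int × Int)} {s w : Int × Int} {y t' : Int}
    (h : RF ms s w) : edgeAdj ms w.2 y t' → w.1 ≤ t' → RF ms s (t', y) := by
  induction h with
  | refl s => intro he hle; exact RF.head he hle (RF.refl _)
  | head e l _ ih => intro he hle; exact RF.head e l (ih he hle)

theorem Good_snoc {ms : List (Int × Int × Int)} {f : Int} {w : Int × Int} {y t' : Int}
    (h : Good ms f w) (he : edgeAdj ms w.2 y t') (hle : w.1 ≤ t') : Good ms f (t', y) := by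
  rcases h with h | h
  · exact Or.inl (RF_snoc h he hle)
  · exact Or.inr (RF_snoc h he hle)

-- ---- heap model lemmas ----

theorem hpush_mem (h : List (Int × Int)) (p q : Int × Int) :
    q ∈ hpush h p ↔ q ∈ h ∨ q = p := by
  induction h with
  | nil => simp [hpush]
  | cons a h ih =>
    by_cases hlt : p.1 < a.1 ∨ (p.1 = a.1 ∧ p.2 < a.2)
    · simp only [hpush, if_pos hlt, List.mem_cons]; tauto
    · simp only [hpush, if_neg hlt, List.mem_cons, ih]; tauto

theorem hpush_length (h : List (Int × Int)) (p : Int × Int) :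
    (hpush h p).length = h.length + 1 := by
  induction h with
  | nil => simp [hpush]
  | cons a h ih =>
    by_cases hlt : p.1 < a.1 ∨ (p.1 = a.1 ∧ p.2 < a.2)
    · simp [hpush, if_pos hlt]
    · simp [hpush, if_neg hlt, ih]

theorem hpush_pairwise {h : List (Int × Int)} (p : Int × Int)
    (hts : h.Pairwise (fun a b => a.1 ≤ b.1)) :
    (hpush h p).Pairwise (fun a b => a.1 ≤ b.1) := by
  induction h with
  | nil => simp [hpush]
  | cons a h ih =>
    rcases List.pairwise_cons.mp hts with ⟨ha, ht⟩
    by_cases hlt : p.1 < a.1 ∨ (p.1 = a.1 ∧ p.2 < a.2)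
    · rw [hpush, if_pos hlt]
      refine List.pairwise_cons.mpr ⟨?_, hts⟩
      intro b hb
      rcases List.mem_cons.mp hb with rfl | hb
      · omega
      · have := ha b hb; omega
    · rw [hpush, if_neg hlt]
      refine List.pairwise_cons.mpr ⟨?_, ih ht⟩
      intro b hb
      rcases (hpush_mem h p b).mp hb with hb | rfl
      · exact ha b hb
      · omega

theorem pushAll_mem (t : Int) (hs adj : List (Int × Int)) (q : Int × Int) :
    q ∈ pushAll t hs adj ↔ q ∈ hs ∨ ∃ nb ∈ adj, t ≤ nb.2 ∧ q = (nb.2, nb.1) := by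
  induction adj generalizing hs with
  | nil => simp [pushAll]
  | cons e adj ih =>
    show q ∈ pushAll t (if t ≤ e.2 then hpush hs (e.2, e.1) else hs) adj ↔ _
    by_cases hte : t ≤ e.2
    · rw [if_pos hte, ih, hpush_mem]
      simp only [List.mem_cons]
      constructor
      · rintro ((hq | rfl) | ⟨nb, hnb, h1, h2⟩)
        · exact Or.inl hq
        · exact Or.inr ⟨e, Or.inl rfl, hte, rfl⟩
        · exact Or.inr ⟨nb, Or.inr hnb, h1, h2⟩
      · rintro (hq | ⟨nb, (rfl | hnb), h1, h2⟩)
        · exact Or.inl (Or.inl hq)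
        · exact Or.inl (Or.inr h2)
        · exact Or.inr ⟨nb, hnb, h1, h2⟩
    · rw [if_neg hte, ih]
      simp only [List.mem_cons]
      constructor
      · rintro (hq | ⟨nb, hnb, h1, h2⟩)
        · exact Or.inl hq
        · exact Or.inr ⟨nb, Or.inr hnb, h1, h2⟩
      · rintro (hq | ⟨nb, (rfl | hnb), h1, h2⟩)
        · exact Or.inl hq
        · exact absurd h1 hte
        · exact Or.inr ⟨nb, hnb, h1, h2⟩

theorem pushAll_length (t : Int) (hs adj : List (Int × Int)) :
    (pushAll t hs adj).length ≤ hs.length + adj.length := by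
  induction adj generalizing hs with
  | nil => simp [pushAll]
  | cons e adj ih =>
    show (pushAll t (if t ≤ e.2 then hpush hs (e.2, e.1) else hs) adj).length ≤ _
    by_cases hte : t ≤ e.2
    · rw [if_pos hte]
      have h := ih (hpush hs (e.2, e.1))
      rw [hpush_length] at h
      simp only [List.length_cons]
      omega
    · rw [if_neg hte]
      have h := ih hs
      simp only [List.length_cons]
      omega

theorem pushAll_pairwise (t : Int) {hs : List (Int × Int)} (adj : List (Int × Int))
    (hts : hs.Pairwise (fun a b => a.1 ≤ b.1)) :
    (pushAll t hs adj).Pairwise (fun a b => a.1 ≤ b.1) := by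
  induction adj generalizing hs with
  | nil => simpa [pushAll]
  | cons e adj ih =>
    show (pushAll t (if t ≤ e.2 then hpush hs (e.2, e.1) else hs) adj).Pairwise _
    by_cases hte : t ≤ e.2
    · rw [if_pos hte]; exact ih (hpush_pairwise _ hts)
    · rw [if_neg hte]; exact ih hts

-- ---- graph lemmas ----

theorem stepA_getD (g : PySem.Dict Int (List (Int × Int))) (e : Int × Int × Int) (x : Int) :
    (stepA g e).getD x [] =
      g.getD x [] ++ (if x = e.1 then [(e.2.1, e.2.2)] else [])
        ++ (if x = e.2.1 then [(e.1, e.2.2)] else []) := by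
  unfold stepA
  by_cases h1 : x = e.1 <;> by_cases h2 : x = e.2.1 <;>
    simp [PySem.Dict.getD_insert, h1, h2] <;> simp_all

def degA (g : PySem.Dict Int (List (Int × Int))) (p : Int) : Nat := (g.getD p []).length

theorem stepA_deg (g : PySem.Dict Int (List (Int × Int))) (e : Int × Int × Int) (x : Int) :
    degA (stepA g e) x =
      degA g x + (if x = e.1 then 1 else 0) + (if x = e.2.1 then 1 else 0) := by
  simp only [degA, stepA_getD, List.length_append]
  split_ifs <;> simp

theorem degA_empty (p : Int) : degA (PySem.Dict.empty (κ := Int) (ν := List (Int × Int))) p = 0 := by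
  simp [degA, PySem.Dict.empty, PySem.Dict.getD, PySem.Dict.get?]

theorem buildGraphA_mem (ms : List (Int × Int × Int)) (x nb mt : Int) :
    (nb, mt) ∈ (buildGraphA ms).getD x [] ↔ edgeAdj ms x nb mt := by
  have key : ∀ (ms : List (Int × Int × Int)) (g0 : PySem.Dict Int (List (Int × Int))),
      (nb, mt) ∈ (ms.foldl stepA g0).getD x [] ↔
        (nb, mt) ∈ g0.getD x [] ∨ edgeAdj ms x nb mt := by
    intro ms
    induction ms with
    | nil => intro g0; simp [edgeAdj]
    | cons e ms ih =>
      intro g0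
      obtain ⟨a, b, c⟩ := e
      rw [List.foldl_cons, ih (stepA g0 (a, b, c)), stepA_getD]
      simp only [edgeAdj, List.mem_append, List.mem_cons, Prod.ext_iff]
      split_ifs with h1 h2 <;> simp_all <;> tauto
  rw [buildGraphA, key]
  simp [PySem.Dict.empty, PySem.Dict.getD, PySem.Dict.get?]

theorem sum_deg_le (ms : List (Int × Int × Int)) (S : Finset Int) :
    ∀ g0 : PySem.Dict Int (List (Int × Int)),
      (∑ p ∈ S, degA (ms.foldl stepA g0) p) ≤ (∑ p ∈ S, degA g0 p) + 2 * ms.length := by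
  induction ms with
  | nil => intro g0; simp
  | cons e ms ih =>
    intro g0
    rw [List.foldl_cons]
    refine (ih (stepA g0 e)).trans ?_
    have hstep : (∑ p ∈ S, degA (stepA g0 e) p) ≤ (∑ p ∈ S, degA g0 p) + 2 := by
      have h1 : (∑ p ∈ S, (if p = e.1 then (1 : Nat) else 0)) ≤ 1 := by
        rw [Finset.sum_ite_eq' S e.1 (fun _ => (1 : Nat))]
        split_ifs <;> omega
      have h2 : (∑ p ∈ S, (if p = e.2.1 then (1 : Nat) else 0)) ≤ 1 := by
        rw [Finset.sum_ite_eq' S e.2.1 (fun _ => (1 : Nat))]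
        split_ifs <;> omega
      calc (∑ p ∈ S, degA (stepA g0 e) p)
          = (∑ p ∈ S, degA g0 p) + (∑ p ∈ S, (if p = e.1 then (1 : Nat) else 0))
            + (∑ p ∈ S, (if p = e.2.1 then (1 : Nat) else 0)) := by
            simp only [stepA_deg, Finset.sum_add_distrib]
        _ ≤ _ := by omega
    simp only [List.length_cons]
    omega

-- every person the algorithm can ever see
def allP (ms : List (Int × Int × Int)) (f : Int) : Finset Int :=
  (0 :: f :: ms.flatMap (fun e => [e.1, e.2.1])).toFinset

theorem edgeAdj_mem_allP {ms : List (Int × Int × Int)} {f x y t : Int}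
    (h : edgeAdj ms x y t) : y ∈ allP ms f := by
  simp only [allP, List.mem_toFinset, List.mem_cons, List.mem_flatMap]
  rcases h with h | h
  · exact Or.inr (Or.inr ⟨(x, y, t), h, by simp⟩)
  · exact Or.inr (Or.inr ⟨(y, x, t), h, by simp⟩)

def restSum (g : PySem.Dict Int (List (Int × Int))) (res : List Int) (P : Finset Int) : Nat :=
  ∑ p ∈ P.filter (fun p => p ∉ res), degA g p

theorem restSum_le (g : PySem.Dict Int (List (Int × Int))) (res : List Int) (P : Finset Int) :
    restSum g res P ≤ ∑ p ∈ P, degA g p :=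
  Finset.sum_le_sum_of_subset (Finset.filter_subset _ _)

theorem restSum_add (g : PySem.Dict Int (List (Int × Int))) (res : PySem.Set Int)
    (P : Finset Int) {c : Int} (hc : c ∈ P) (hcr : c ∉ res) :
    restSum g res P = degA g c + restSum g (res.add c) P := by
  have hset : P.filter (fun p => p ∉ PySem.Set.add res c) =
      (P.filter (fun p => p ∉ res)).erase c := by
    ext p
    simp only [Finset.mem_filter, Finset.mem_erase, PySem.Set.mem_add]
    tauto
  have hcf : c ∈ P.filter (fun p => p ∉ res) := by
    simp [Finset.mem_filter, hc, hcr]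
  rw [restSum, restSum, hset, ← Finset.add_sum_erase _ _ hcf]

-- ---- loop A lemmas ----

theorem loopA_mono (g : PySem.Dict Int (List (Int × Int))) :
    ∀ (fuel : Nat) (heap : List (Int × Int)) (res : PySem.Set Int) (x : Int),
      x ∈ res → x ∈ loopA g fuel heap res := by
  intro fuel
  induction fuel with
  | zero => intro heap res x hx; simpa [loopA]
  | succ fuel ih =>
    intro heap res x hx
    match heap with
    | [] => simpa [loopA]
    | (t0, c) :: hs =>
      by_cases hc : c ∉ res
      · simp only [loopA, if_pos hc]
        exact ih _ _ x ((PySem.Set.mem_add res c x).mpr (Or.inl hx))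
      · simp only [loopA, if_neg hc]
        exact ih _ _ x hx

theorem loopA_nodup (g : PySem.Dict Int (List (Int × Int))) :
    ∀ (fuel : Nat) (heap : List (Int × Int)) (res : PySem.Set Int),
      res.Nodup → (loopA g fuel heap res).Nodup := by
  intro fuel
  induction fuel with
  | zero => intro heap res h; simpa [loopA]
  | succ fuel ih =>
    intro heap res h
    match heap with
    | [] => simpa [loopA]
    | (t0, c) :: hs =>
      by_cases hc : c ∉ res
      · simp only [loopA, if_pos hc]
        exact ih _ _ (PySem.Set.nodup_add res c h)
      · simp only [loopA, if_neg hc]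
        exact ih _ _ h

theorem loopA_sound (ms : List (Int × Int × Int)) (f : Int) :
    ∀ (fuel : Nat) (heap : List (Int × Int)) (res : PySem.Set Int),
      (∀ p ∈ heap, Good ms f p) → (∀ x ∈ res, ∃ t, Good ms f (t, x)) →
      ∀ x ∈ loopA (buildGraphA ms) fuel heap res, ∃ t, Good ms f (t, x) := by
  intro fuel
  induction fuel with
  | zero => intro heap res _ hres x hx; exact hres x (by simpa [loopA] using hx)
  | succ fuel ih =>
    intro heap res hheap hres x hx
    match heap with
    | [] => exact hres x (by simpa [loopA] using hx)
    | (t0, c) :: hs =>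
      have hgc : Good ms f (t0, c) := hheap _ (List.mem_cons_self ..)
      by_cases hc : c ∉ res
      · simp only [loopA, if_pos hc] at hx
        refine ih _ _ ?_ ?_ x hx
        · intro p hp
          rcases (pushAll_mem t0 hs _ p).mp hp with hp | ⟨nb, hnb, hle, rfl⟩
          · exact hheap p (List.mem_cons_of_mem _ hp)
          · have he : edgeAdj ms c nb.1 nb.2 := (buildGraphA_mem ms c nb.1 nb.2).mp (by simpa using hnb)
            exact Good_snoc hgc he hle
        · intro y hy
          rcases (PySem.Set.mem_add res c y).mp hy with hy | rfl
          · exact hres y hy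
          · exact ⟨t0, hgc⟩
      · simp only [loopA, if_neg hc] at hx
        exact ih _ _ (fun p hp => hheap p (List.mem_cons_of_mem _ hp)) hres x hx

-- completeness: everything reachable from a heap entry (or from an already-processed person,
-- at a time at or above the heap's lower bound m) ends up in the result
theorem loopA_complete (ms : List (Int × Int × Int)) (f : Int) :
    ∀ (fuel : Nat) (heap : List (Int × Int)) (res : PySem.Set Int) (m : Int),
      heap.length + 2 * restSum (buildGraphA ms) res (allP ms f) ≤ fuel →
      heap.Pairwise (fun a b => a.1 ≤ b.1) →
      (∀ p ∈ heap, p.2 ∈ allP ms f) →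
      (∀ p ∈ heap, m ≤ p.1) →
      (∀ x ∈ res, ∀ y t', edgeAdj ms x y t' → m ≤ t' → y ∈ res ∨ (t', y) ∈ heap) →
      ∀ s u : Int × Int, RF ms s u →
        (s ∈ heap ∨ (s.2 ∈ res ∧ m ≤ s.1)) →
        u.2 ∈ loopA (buildGraphA ms) fuel heap res := by
  set G := buildGraphA ms with hG
  intro fuel
  induction fuel with
  | zero =>
    intro heap res m hphi hts hhp hhb hinv s u hrf
    match heap with
    | [] =>
      induction hrf with
      | refl s =>
        rintro (h | ⟨hr, _⟩)
        · exact absurd h (List.not_mem_nil)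
        · simpa [loopA] using hr
      | head e hle tail ihtail =>
        rename_i t x t' y u
        rintro (h | ⟨hr, hm⟩)
        · exact absurd h (List.not_mem_nil)
        · rcases hinv x hr y t' e (le_trans hm hle) with hy | hy
          · exact ihtail (Or.inr ⟨hy, le_trans hm hle⟩)
          · exact absurd hy (List.not_mem_nil)
    | (t0, c) :: hs => simp at hphi
  | succ fuel ih =>
    intro heap res m hphi hts hhp hhb hinv s u hrf
    match heap with
    | [] =>
      induction hrf with
      | refl s =>
        rintro (h | ⟨hr, _⟩)
        · exact absurd h (List.not_mem_nil)
        · simpa [loopA] using hr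
      | head e hle tail ihtail =>
        rename_i t x t' y u
        rintro (h | ⟨hr, hm⟩)
        · exact absurd h (List.not_mem_nil)
        · rcases hinv x hr y t' e (le_trans hm hle) with hy | hy
          · exact ihtail (Or.inr ⟨hy, le_trans hm hle⟩)
          · exact absurd hy (List.not_mem_nil)
    | (t0, c) :: hs =>
      have hm0 : m ≤ t0 := hhb (t0, c) (List.mem_cons_self ..)
      have hhbhs : ∀ p ∈ hs, t0 ≤ p.1 := (List.pairwise_cons.mp hts).1
      have htshs : hs.Pairwise (fun a b => a.1 ≤ b.1) := (List.pairwise_cons.mp hts).2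
      have hhphs : ∀ p ∈ hs, p.2 ∈ allP ms f := fun p hp => hhp p (List.mem_cons_of_mem _ hp)
      by_cases hc : c ∉ res
      · -- pop a new person c: push its admissible neighbours, add c to res
        have hcP : c ∈ allP ms f := hhp (t0, c) (List.mem_cons_self ..)
        have heq : loopA G (fuel + 1) ((t0, c) :: hs) res
            = loopA G fuel (pushAll t0 hs (G.getD c [])) (res.add c) := by
          simp [loopA, hc]
        have hsum := restSum_add G res (allP ms f) hcP hc
        have hlen := pushAll_length t0 hs (G.getD c [])
        have hdeg : degA G c = (G.getD c []).length := rfl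
        have hphi' : (pushAll t0 hs (G.getD c [])).length
            + 2 * restSum G (res.add c) (allP ms f) ≤ fuel := by
          simp only [List.length_cons] at hphi
          omega
        have hts' := pushAll_pairwise t0 (G.getD c []) htshs
        have hhp' : ∀ p ∈ pushAll t0 hs (G.getD c []), p.2 ∈ allP ms f := by
          intro p hp
          rcases (pushAll_mem t0 hs _ p).mp hp with hp | ⟨nb, hnb, _, rfl⟩
          · exact hhphs p hp
          · exact edgeAdj_mem_allP ((buildGraphA_mem ms c nb.1 nb.2).mp (by simpa using hnb))
        have hhb' : ∀ p ∈ pushAll t0 hs (G.getD c []), t0 ≤ p.1 := by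
          intro p hp
          rcases (pushAll_mem t0 hs _ p).mp hp with hp | ⟨nb, hnb, hle, rfl⟩
          · exact hhbhs p hp
          · exact hle
        have hinv' : ∀ x ∈ res.add c, ∀ y t', edgeAdj ms x y t' → t0 ≤ t' →
            y ∈ res.add c ∨ (t', y) ∈ pushAll t0 hs (G.getD c []) := by
          intro x hx y t' he ht'
          rcases (PySem.Set.mem_add res c x).mp hx with hx | rfl
          · rcases hinv x hx y t' he (le_trans hm0 ht') with h | h
            · exact Or.inl ((PySem.Set.mem_add res c y).mpr (Or.inl h))
            · rcases List.mem_cons.mp h with h | h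
              · have hy : y = c := (Prod.mk.injEq _ _ _ _ |>.mp h).2
                exact Or.inl ((PySem.Set.mem_add res c y).mpr (Or.inr hy))
              · exact Or.inr ((pushAll_mem t0 hs _ _).mpr (Or.inl h))
          · have hadj : (y, t') ∈ G.getD x [] := (buildGraphA_mem ms x y t').mpr he
            exact Or.inr ((pushAll_mem t0 hs _ _).mpr (Or.inr ⟨(y, t'), hadj, ht', rfl⟩))
        induction hrf with
        | refl s =>
          rintro (hh | ⟨hr, _⟩)
          · rcases List.mem_cons.mp hh with rfl | htl
            · rw [heq]
              exact loopA_mono G fuel _ _ c ((PySem.Set.mem_add res c c).mpr (Or.inr rfl))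
            · rw [heq]
              exact ih _ _ t0 hphi' hts' hhp' hhb' hinv' s s (RF.refl s)
                (Or.inl ((pushAll_mem t0 hs _ s).mpr (Or.inl htl)))
          · rw [heq]
            exact loopA_mono G fuel _ _ _ ((PySem.Set.mem_add res c _).mpr (Or.inl hr))
        | head e hle tail ihtail =>
          rename_i t x t' y u
          rintro (hh | ⟨hr, hm'⟩)
          · rcases List.mem_cons.mp hh with hhd | htl
            · have hx : x = c := (Prod.mk.injEq _ _ _ _ |>.mp hhd).2
              have ht : t = t0 := (Prod.mk.injEq _ _ _ _ |>.mp hhd).1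
              have hadj : (y, t') ∈ G.getD c [] := (buildGraphA_mem ms c y t').mpr (hx ▸ e)
              rw [heq]
              exact ih _ _ t0 hphi' hts' hhp' hhb' hinv' (t', y) u tail
                (Or.inl ((pushAll_mem t0 hs _ _).mpr (Or.inr ⟨(y, t'), hadj, ht ▸ hle, rfl⟩)))
            · rw [heq]
              exact ih _ _ t0 hphi' hts' hhp' hhb' hinv' (t, x) u (RF.head e hle tail)
                (Or.inl ((pushAll_mem t0 hs _ _).mpr (Or.inl htl)))
          · rcases hinv x hr y t' e (le_trans hm' hle) with hy | hy
            · exact ihtail (Or.inr ⟨hy, le_trans hm' hle⟩)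
            · exact ihtail (Or.inl hy)
      · -- pop an already-processed person: drop the entry
        rw [not_not] at hc
        have heq : loopA G (fuel + 1) ((t0, c) :: hs) res = loopA G fuel hs res := by
          simp [loopA, hc]
        have hphi' : hs.length + 2 * restSum G res (allP ms f) ≤ fuel := by
          simp only [List.length_cons] at hphi; omega
        have hinv' : ∀ x ∈ res, ∀ y t', edgeAdj ms x y t' → t0 ≤ t' →
            y ∈ res ∨ (t', y) ∈ hs := by
          intro x hx y t' he ht'
          rcases hinv x hx y t' he (le_trans hm0 ht') with h | h
          · exact Or.inl h
          · rcases List.mem_cons.mp h with h | h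
            · have hy : y = c := (Prod.mk.injEq _ _ _ _ |>.mp h).2
              exact Or.inl (hy ▸ hc)
            · exact Or.inr h
        induction hrf with
        | refl s =>
          rintro (hh | ⟨hr, _⟩)
          · rcases List.mem_cons.mp hh with rfl | htl
            · rw [heq]; exact loopA_mono G fuel _ _ c hc
            · rw [heq]
              exact ih _ _ t0 hphi' htshs hhphs hhbhs hinv' s s (RF.refl s) (Or.inl htl)
          · rw [heq]; exact loopA_mono G fuel _ _ _ hr
        | head e hle tail ihtail =>
          rename_i t x t' y u
          rintro (hh | ⟨hr, hm'⟩)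
          · rcases List.mem_cons.mp hh with hhd | htl
            · have hx : x = c := (Prod.mk.injEq _ _ _ _ |>.mp hhd).2
              have ht : t = t0 := (Prod.mk.injEq _ _ _ _ |>.mp hhd).1
              rcases hinv c hc y t' (hx ▸ e) (le_trans hm0 (ht ▸ hle)) with hy | hy
              · exact ihtail (Or.inr ⟨hy, le_trans hm0 (ht ▸ hle)⟩)
              · exact ihtail (Or.inl hy)
            · rw [heq]
              exact ih _ _ t0 hphi' htshs hhphs hhbhs hinv' (t, x) u (RF.head e hle tail)
                (Or.inl htl)
          · rcases hinv x hr y t' e (le_trans hm' hle) with hy | hy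
            · exact ihtail (Or.inr ⟨hy, le_trans hm' hle⟩)
            · exact ihtail (Or.inl hy)

theorem heap0_mem (f : Int) (q : Int × Int) :
    q ∈ hpush (hpush [] (0, 0)) (0, f) ↔ q = (0, 0) ∨ q = (0, f) := by
  rw [hpush_mem, hpush_mem]
  simp

-- final characterisation of A's result set
theorem memA_iff (ms : List (Int × Int × Int)) (f x : Int) :
    x ∈ loopA (buildGraphA ms) (4 * ms.length + 3) (hpush (hpush [] (0, 0)) (0, f))
        PySem.Set.empty ↔ ∃ t, Good ms f (t, x) := by
  constructor
  · intro hx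
    refine loopA_sound ms f _ _ _ ?_ ?_ x hx
    · intro p hp
      rcases (heap0_mem f p).mp hp with rfl | rfl
      · exact Or.inl (RF.refl _)
      · exact Or.inr (RF.refl _)
    · intro y hy; exact absurd hy (by simp [PySem.Set.empty])
  · rintro ⟨t, hg⟩
    have hphi : (hpush (hpush [] (0, 0)) (0, f)).length
        + 2 * restSum (buildGraphA ms) PySem.Set.empty (allP ms f) ≤ 4 * ms.length + 3 := by
      have h1 : (hpush (hpush [] (0, 0)) (0, f)).length = 2 := by
        rw [hpush_length, hpush_length]; rfl
      have h2 := restSum_le (buildGraphA ms) PySem.Set.empty (allP ms f)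
      have h3 := sum_deg_le ms (allP ms f) PySem.Dict.empty
      simp only [degA_empty, Finset.sum_const_zero, Nat.zero_add] at h3
      rw [buildGraphA] at h2 ⊢
      omega
    have hts : (hpush (hpush [] (0, 0)) (0, f)).Pairwise (fun a b => a.1 ≤ b.1) :=
      hpush_pairwise _ (hpush_pairwise _ (List.Pairwise.nil))
    have hhp : ∀ p ∈ hpush (hpush [] (0, 0)) (0, f), p.2 ∈ allP ms f := by
      intro p hp
      rcases (heap0_mem f p).mp hp with rfl | rfl <;> simp [allP]
    have hhb : ∀ p ∈ hpush (hpush [] (0, 0)) (0, f), (0 : Int) ≤ p.1 := by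
      intro p hp
      rcases (heap0_mem f p).mp hp with rfl | rfl <;> simp
    have hinv : ∀ y ∈ (PySem.Set.empty : PySem.Set Int), ∀ z t', edgeAdj ms y z t' →
        (0 : Int) ≤ t' → z ∈ (PySem.Set.empty : PySem.Set Int)
          ∨ (t', z) ∈ hpush (hpush [] (0, 0)) (0, f) := by
      intro y hy; exact absurd hy (by simp [PySem.Set.empty])
    rcases hg with hg | hg
    · exact loopA_complete ms f _ _ _ 0 hphi hts hhp hhb hinv (0, 0) (t, x) hg
        (Or.inl ((heap0_mem f _).mpr (Or.inl rfl)))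
    · exact loopA_complete ms f _ _ _ 0 hphi hts hhp hhb hinv (0, f) (t, x) hg
        (Or.inl ((heap0_mem f _).mpr (Or.inr rfl)))

-- ---- loop B lemmas ----

theorem addState_eq_of_mem {acc : PySem.Set (Int × Int) × List (Int × Int)} {s : Int × Int}
    (h : s ∈ acc.1) : addState acc s = acc := by
  rw [addState, if_neg (not_not_intro h)]

theorem addState_eq_of_not_mem {acc : PySem.Set (Int × Int) × List (Int × Int)} {s : Int × Int}
    (h : s ∉ acc.1) : addState acc s = (acc.1.add s, acc.2 ++ [s]) := by
  rw [addState, if_pos h]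

theorem addState_fst_mem (acc : PySem.Set (Int × Int) × List (Int × Int)) (s q : Int × Int) :
    q ∈ (addState acc s).1 ↔ q ∈ acc.1 ∨ q = s := by
  by_cases h : s ∈ acc.1
  · rw [addState_eq_of_mem h]
    constructor
    · exact fun h' => Or.inl h'
    · rintro (h' | rfl)
      · exact h'
      · exact h
  · rw [addState_eq_of_not_mem h]
    exact PySem.Set.mem_add acc.1 s q

theorem addState_snd_sub {acc : PySem.Set (Int × Int) × List (Int × Int)} {s q : Int × Int} :
    q ∈ (addState acc s).2 → q ∈ acc.2 ∨ q = s := by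
  by_cases h : s ∈ acc.1
  · rw [addState_eq_of_mem h]; exact Or.inl
  · rw [addState_eq_of_not_mem h]
    intro hq
    rcases List.mem_append.mp hq with hq | hq
    · exact Or.inl hq
    · exact Or.inr (by simpa using hq)

theorem addState_snd_mono {acc : PySem.Set (Int × Int) × List (Int × Int)} {s q : Int × Int} :
    q ∈ acc.2 → q ∈ (addState acc s).2 := by
  by_cases h : s ∈ acc.1
  · rw [addState_eq_of_mem h]; exact id
  · rw [addState_eq_of_not_mem h]
    intro hq
    exact List.mem_append.mpr (Or.inl hq)

theorem addState_new_in_snd {acc : PySem.Set (Int × Int) × List (Int × Int)} {s q : Int × Int} :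
    q ∈ (addState acc s).1 → q ∈ acc.1 ∨ q ∈ (addState acc s).2 := by
  intro hq
  by_cases h : s ∈ acc.1
  · rw [addState_eq_of_mem h] at hq
    exact Or.inl hq
  · rw [addState_eq_of_not_mem h] at hq ⊢
    rcases (PySem.Set.mem_add acc.1 s q).mp hq with hq | rfl
    · exact Or.inl hq
    · exact Or.inr (by simp)

theorem addState_nodup {acc : PySem.Set (Int × Int) × List (Int × Int)} {s : Int × Int}
    (h : acc.1.Nodup) : (addState acc s).1.Nodup := by
  by_cases h2 : s ∈ acc.1
  · rw [addState_eq_of_mem h2]; exact h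
  · rw [addState_eq_of_not_mem h2]; exact PySem.Set.nodup_add _ _ h

theorem addState_len (acc : PySem.Set (Int × Int) × List (Int × Int)) (s : Int × Int) :
    (addState acc s).2.length + acc.1.length = acc.2.length + (addState acc s).1.length := by
  by_cases h : s ∈ acc.1
  · rw [addState_eq_of_mem h]
  · rw [addState_eq_of_not_mem h]
    have hl : (PySem.Set.add acc.1 s).length = acc.1.length + 1 := by
      simp [PySem.Set.add, h]
    simp only [List.length_append, List.length_cons, List.length_nil, hl]
    omega

theorem addState_fst_len_mono (acc : PySem.Set (Int × Int) × List (Int × Int)) (s : Int × Int) :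
    acc.1.length ≤ (addState acc s).1.length := by
  by_cases h : s ∈ acc.1
  · rw [addState_eq_of_mem h]
  · rw [addState_eq_of_not_mem h]
    have hl : (PySem.Set.add acc.1 s).length = acc.1.length + 1 := by
      simp [PySem.Set.add, h]
    simp [hl]

-- what one meeting e may contribute from the popped state (t, x)
def addsOf (t x : Int) (e : Int × Int × Int) (q : Int × Int) : Prop :=
  t ≤ e.2.2 ∧ ((e.1 = x ∧ q = (e.2.2, e.2.1)) ∨ (e.2.1 = x ∧ q = (e.2.2, e.1)))

def ScanAdds (ms : List (Int × Int × Int)) (t x : Int) (q : Int × Int) : Prop :=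
  ∃ e ∈ ms, addsOf t x e q

theorem scanStep_fst_mem (t x : Int) (acc : PySem.Set (Int × Int) × List (Int × Int))
    (e : Int × Int × Int) (q : Int × Int) :
    q ∈ (scanStep t x acc e).1 ↔ q ∈ acc.1 ∨ addsOf t x e q := by
  unfold scanStep
  split_ifs with h0 h1 h2 h2 <;>
    simp_all [addsOf, addState_fst_mem]

theorem scanStep_snd_sub {t x : Int} {acc : PySem.Set (Int × Int) × List (Int × Int)}
    {e : Int × Int × Int} {q : Int × Int} :
    q ∈ (scanStep t x acc e).2 → q ∈ acc.2 ∨ q ∈ (scanStep t x acc e).1 := by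
  unfold scanStep
  split_ifs with h0 h1 h2 h2 <;> intro hq
  · rcases addState_snd_sub hq with hq | rfl
    · rcases addState_snd_sub hq with hq | rfl
      · exact Or.inl hq
      · exact Or.inr ((addState_fst_mem _ _ _).mpr
          (Or.inl ((addState_fst_mem _ _ _).mpr (Or.inr rfl))))
    · exact Or.inr ((addState_fst_mem _ _ _).mpr (Or.inr rfl))
  · rcases addState_snd_sub hq with hq | rfl
    · exact Or.inl hq
    · exact Or.inr ((addState_fst_mem _ _ _).mpr (Or.inr rfl))
  · rcases addState_snd_sub hq with hq | rfl
    · exact Or.inl hq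
    · exact Or.inr ((addState_fst_mem _ _ _).mpr (Or.inr rfl))
  · exact Or.inl hq
  · exact Or.inl hq

theorem scanStep_snd_mono {t x : Int} {acc : PySem.Set (Int × Int) × List (Int × Int)}
    {e : Int × Int × Int} {q : Int × Int} :
    q ∈ acc.2 → q ∈ (scanStep t x acc e).2 := by
  unfold scanStep
  split_ifs with h0 h1 h2 h2 <;> intro hq
  · exact addState_snd_mono (addState_snd_mono hq)
  · exact addState_snd_mono hq
  · exact addState_snd_mono hq
  · exact hq
  · exact hq

theorem scanStep_new_in_snd {t x : Int} {acc : PySem.Set (Int × Int) × List (Int × Int)}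
    {e : Int × Int × Int} {q : Int × Int} :
    q ∈ (scanStep t x acc e).1 → q ∈ acc.1 ∨ q ∈ (scanStep t x acc e).2 := by
  unfold scanStep
  split_ifs with h0 h1 h2 h2 <;> intro hq
  · rcases addState_new_in_snd hq with hq | hq
    · rcases addState_new_in_snd hq with hq | hq
      · exact Or.inl hq
      · exact Or.inr (addState_snd_mono hq)
    · exact Or.inr hq
  · exact addState_new_in_snd hq
  · exact addState_new_in_snd hq
  · exact Or.inl hq
  · exact Or.inl hq

theorem scanStep_nodup {t x : Int} {acc : PySem.Set (Int × Int) × List (Int × Int)}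
    {e : Int × Int × Int} (h : acc.1.Nodup) : (scanStep t x acc e).1.Nodup := by
  unfold scanStep
  split_ifs with h0 h1 h2 h2
  · exact addState_nodup (addState_nodup h)
  · exact addState_nodup h
  · exact addState_nodup h
  · exact h
  · exact h

theorem scanStep_len (t x : Int) (acc : PySem.Set (Int × Int) × List (Int × Int))
    (e : Int × Int × Int) :
    (scanStep t x acc e).2.length + acc.1.length
      = acc.2.length + (scanStep t x acc e).1.length := by
  unfold scanStep
  dsimp only
  split_ifs with h0 h1 h2 h2
  · have ha := addState_len acc (e.2.2, e.2.1)
    have hb := addState_len (addState acc (e.2.2, e.2.1)) (e.2.2, e.1)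
    omega
  · exact addState_len acc (e.2.2, e.1)
  · exact addState_len acc (e.2.2, e.2.1)
  · rfl
  · rfl

theorem scanStep_fst_len_mono (t x : Int) (acc : PySem.Set (Int × Int) × List (Int × Int))
    (e : Int × Int × Int) : acc.1.length ≤ (scanStep t x acc e).1.length := by
  unfold scanStep
  dsimp only
  split_ifs with h0 h1 h2 h2
  · have ha := addState_fst_len_mono acc (e.2.2, e.2.1)
    have hb := addState_fst_len_mono (addState acc (e.2.2, e.2.1)) (e.2.2, e.1)
    omega
  · exact addState_fst_len_mono acc (e.2.2, e.1)
  · exact addState_fst_len_mono acc (e.2.2, e.2.1)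
  · exact le_refl _
  · exact le_refl _

theorem foldScan_fst_mem (ms : List (Int × Int × Int)) (t x : Int) (q : Int × Int) :
    ∀ acc : PySem.Set (Int × Int) × List (Int × Int),
      q ∈ (ms.foldl (scanStep t x) acc).1 ↔ q ∈ acc.1 ∨ ScanAdds ms t x q := by
  induction ms with
  | nil => intro acc; simp [ScanAdds]
  | cons e ms ih =>
    intro acc
    rw [List.foldl_cons, ih, scanStep_fst_mem]
    simp only [ScanAdds, List.mem_cons]
    constructor
    · rintro ((h | h) | ⟨e', he', h⟩)
      · exact Or.inl h
      · exact Or.inr ⟨e, Or.inl rfl, h⟩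
      · exact Or.inr ⟨e', Or.inr he', h⟩
    · rintro (h | ⟨e', (rfl | he'), h⟩)
      · exact Or.inl (Or.inl h)
      · exact Or.inl (Or.inr h)
      · exact Or.inr ⟨e', he', h⟩

theorem foldScan_snd_mono (ms : List (Int × Int × Int)) (t x : Int) (q : Int × Int) :
    ∀ acc : PySem.Set (Int × Int) × List (Int × Int),
      q ∈ acc.2 → q ∈ (ms.foldl (scanStep t x) acc).2 := by
  induction ms with
  | nil => intro acc h; simpa
  | cons e ms ih =>
    intro acc h
    rw [List.foldl_cons]
    exact ih _ (scanStep_snd_mono h)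

theorem foldScan_fst_mono (ms : List (Int × Int × Int)) (t x : Int) (q : Int × Int)
    (acc : PySem.Set (Int × Int) × List (Int × Int)) (h : q ∈ acc.1) :
    q ∈ (ms.foldl (scanStep t x) acc).1 :=
  (foldScan_fst_mem ms t x q acc).mpr (Or.inl h)

theorem foldScan_snd_sub (ms : List (Int × Int × Int)) (t x : Int) (q : Int × Int) :
    ∀ acc : PySem.Set (Int × Int) × List (Int × Int),
      q ∈ (ms.foldl (scanStep t x) acc).2 →
        q ∈ acc.2 ∨ q ∈ (ms.foldl (scanStep t x) acc).1 := by
  induction ms with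
  | nil => intro acc h; exact Or.inl (by simpa using h)
  | cons e ms ih =>
    intro acc h
    rw [List.foldl_cons] at h ⊢
    rcases ih _ h with h | h
    · rcases scanStep_snd_sub h with h | h
      · exact Or.inl h
      · exact Or.inr (foldScan_fst_mono ms t x q _ h)
    · exact Or.inr h

theorem foldScan_new_in_snd (ms : List (Int × Int × Int)) (t x : Int) (q : Int × Int) :
    ∀ acc : PySem.Set (Int × Int) × List (Int × Int),
      q ∈ (ms.foldl (scanStep t x) acc).1 → q ∈ acc.1 ∨ q ∈ (ms.foldl (scanStep t x) acc).2 := by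
  induction ms with
  | nil => intro acc h; exact Or.inl (by simpa using h)
  | cons e ms ih =>
    intro acc h
    rw [List.foldl_cons] at h ⊢
    rcases ih _ h with h | h
    · rcases scanStep_new_in_snd h with h | h
      · exact Or.inl h
      · exact Or.inr (foldScan_snd_mono ms t x q _ h)
    · exact Or.inr h

theorem foldScan_nodup (ms : List (Int × Int × Int)) (t x : Int) :
    ∀ acc : PySem.Set (Int × Int) × List (Int × Int),
      acc.1.Nodup → (ms.foldl (scanStep t x) acc).1.Nodup := by
  induction ms with
  | nil => intro acc h; simpa
  | cons e ms ih =>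
    intro acc h
    rw [List.foldl_cons]
    exact ih _ (scanStep_nodup h)

theorem foldScan_len (ms : List (Int × Int × Int)) (t x : Int) :
    ∀ acc : PySem.Set (Int × Int) × List (Int × Int),
      (ms.foldl (scanStep t x) acc).2.length + acc.1.length
        = acc.2.length + (ms.foldl (scanStep t x) acc).1.length := by
  induction ms with
  | nil => intro acc; simp
  | cons e ms ih =>
    intro acc
    rw [List.foldl_cons]
    have h1 := ih (scanStep t x acc e)
    have h2 := scanStep_len t x acc e
    omega

theorem foldScan_fst_len_mono (ms : List (Int × Int × Int)) (t x : Int) :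
    ∀ acc : PySem.Set (Int × Int) × List (Int × Int),
      acc.1.length ≤ (ms.foldl (scanStep t x) acc).1.length := by
  induction ms with
  | nil => intro acc; simp
  | cons e ms ih =>
    intro acc
    rw [List.foldl_cons]
    have h1 := ih (scanStep t x acc e)
    have h2 := scanStep_fst_len_mono t x acc e
    omega

theorem ScanAdds_iff_succ (ms : List (Int × Int × Int)) (t x t' y : Int) :
    ScanAdds ms t x (t', y) ↔ edgeAdj ms x y t' ∧ t ≤ t' := by
  constructor
  · rintro ⟨e, he, h0, (⟨h1, h2⟩ | ⟨h1, h2⟩)⟩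
    · obtain ⟨rfl, rfl⟩ := Prod.mk.injEq _ _ _ _ |>.mp h2
      refine ⟨Or.inl ?_, h0⟩
      have he' : (e.1, e.2.1, e.2.2) ∈ ms := by simpa using he
      rw [h1] at he'
      exact he'
    · obtain ⟨rfl, rfl⟩ := Prod.mk.injEq _ _ _ _ |>.mp h2
      refine ⟨Or.inr ?_, h0⟩
      have he' : (e.1, e.2.1, e.2.2) ∈ ms := by simpa using he
      rw [h1] at he'
      exact he'
  · rintro ⟨(he | he), hle⟩
    · exact ⟨(x, y, t'), he, hle, Or.inl ⟨rfl, rfl⟩⟩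
    · exact ⟨(y, x, t'), he, hle, Or.inr ⟨rfl, rfl⟩⟩

def allSL (ms : List (Int × Int × Int)) (f : Int) : List (Int × Int) :=
  (0, 0) :: (0, f) :: ms.flatMap (fun e => [(e.2.2, e.2.1), (e.2.2, e.1)])

theorem ScanAdds_mem_allSL {ms : List (Int × Int × Int)} {f t x : Int} {q : Int × Int}
    (h : ScanAdds ms t x q) : q ∈ allSL ms f := by
  rcases h with ⟨e, he, _, (⟨_, rfl⟩ | ⟨_, rfl⟩)⟩ <;>
    · simp only [allSL, List.mem_cons, List.mem_flatMap]
      exact Or.inr (Or.inr ⟨e, he, by simp⟩)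

theorem nodup_subset_card {l L : List (Int × Int)} (h1 : l.Nodup) (h2 : ∀ q ∈ l, q ∈ L) :
    l.length ≤ L.toFinset.card := by
  rw [← List.toFinset_card_of_nodup h1]
  exact Finset.card_le_card (fun q hq => by
    simp only [List.mem_toFinset] at hq ⊢
    exact h2 q hq)

theorem loopB_mono (ms : List (Int × Int × Int)) :
    ∀ (fuel : Nat) (states : PySem.Set (Int × Int)) (queue : List (Int × Int)) (q : Int × Int),
      q ∈ states → q ∈ loopB ms fuel states queue := by
  intro fuel
  induction fuel with
  | zero => intro states queue q h; simpa [loopB]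
  | succ fuel ih =>
    intro states queue q h
    match queue with
    | [] => simpa [loopB]
    | (t, x) :: rest =>
      simp only [loopB]
      exact ih _ _ q (foldScan_fst_mono ms t x q (states, rest) h)

theorem loopB_sound (ms : List (Int × Int × Int)) (f : Int) :
    ∀ (fuel : Nat) (states : PySem.Set (Int × Int)) (queue : List (Int × Int)),
      (∀ q ∈ states, Good ms f q) → (∀ q ∈ queue, Good ms f q) →
      ∀ q ∈ loopB ms fuel states queue, Good ms f q := by
  intro fuel
  induction fuel with
  | zero => intro states queue hs _ q hq; exact hs q (by simpa [loopB] using hq)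
  | succ fuel ih =>
    intro states queue hs hq q hmem
    match queue with
    | [] => exact hs q (by simpa [loopB] using hmem)
    | (t, x) :: rest =>
      simp only [loopB] at hmem
      have hgx : Good ms f (t, x) := hq _ (List.mem_cons_self ..)
      have hstates' : ∀ p, p ∈ (ms.foldl (scanStep t x) (states, rest)).1 → Good ms f p := by
        intro p hp
        rcases (foldScan_fst_mem ms t x p (states, rest)).mp hp with hp | hp
        · exact hs p hp
        · have h := (ScanAdds_iff_succ ms t x p.1 p.2).mp (by simpa using hp)
          have := Good_snoc hgx h.1 h.2
          simpa using this
      refine ih _ _ hstates' ?_ q hmem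
      intro p hp
      rcases foldScan_snd_sub ms t x p (states, rest) hp with hp | hp
      · exact hq p (List.mem_cons_of_mem _ hp)
      · exact hstates' p hp

theorem loopB_closed (ms : List (Int × Int × Int)) (f : Int) :
    ∀ (fuel : Nat) (states : PySem.Set (Int × Int)) (queue : List (Int × Int)),
      queue.length + 2 * ((allSL ms f).toFinset.card - states.length) ≤ fuel →
      states.Nodup →
      (∀ q ∈ states, q ∈ allSL ms f) →
      (∀ q ∈ queue, q ∈ states) →
      (∀ s ∈ states, s ∈ queue ∨ ∀ t' y, edgeAdj ms s.2 y t' → s.1 ≤ t' → (t', y) ∈ states) →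
      ∀ s ∈ loopB ms fuel states queue, ∀ t' y, edgeAdj ms s.2 y t' → s.1 ≤ t' →
        (t', y) ∈ loopB ms fuel states queue := by
  intro fuel
  induction fuel with
  | zero =>
    intro states queue hphi hnd hsub hqs hW s hsmem t' y he hle
    match queue with
    | [] =>
      simp only [loopB] at hsmem ⊢
      rcases hW s hsmem with h | h
      · exact absurd h (List.not_mem_nil)
      · exact h t' y he hle
    | p :: rest => simp at hphi
  | succ fuel ih =>
    intro states queue hphi hnd hsub hqs hW s hsmem t' y he hle
    match queue with
    | [] =>
      simp only [loopB] at hsmem ⊢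
      rcases hW s hsmem with h | h
      · exact absurd h (List.not_mem_nil)
      · exact h t' y he hle
    | (t, x) :: rest =>
      simp only [loopB] at hsmem ⊢
      have hnd' : (ms.foldl (scanStep t x) (states, rest)).1.Nodup :=
        foldScan_nodup ms t x (states, rest) hnd
      have hsub' : ∀ q ∈ (ms.foldl (scanStep t x) (states, rest)).1, q ∈ allSL ms f := by
        intro q hq
        rcases (foldScan_fst_mem ms t x q (states, rest)).mp hq with hq | hq
        · exact hsub q hq
        · exact ScanAdds_mem_allSL hq
      have hqs' : ∀ q ∈ (ms.foldl (scanStep t x) (states, rest)).2,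
          q ∈ (ms.foldl (scanStep t x) (states, rest)).1 := by
        intro q hq
        rcases foldScan_snd_sub ms t x q (states, rest) hq with hq | hq
        · exact foldScan_fst_mono ms t x q _ (hqs q (List.mem_cons_of_mem _ hq))
        · exact hq
      have hcard : (ms.foldl (scanStep t x) (states, rest)).1.length
          ≤ (allSL ms f).toFinset.card := nodup_subset_card hnd' hsub'
      have hlenmono : states.length ≤ (ms.foldl (scanStep t x) (states, rest)).1.length :=
        foldScan_fst_len_mono ms t x (states, rest)
      have hlen : (ms.foldl (scanStep t x) (states, rest)).2.length + states.length
          = rest.length + (ms.foldl (scanStep t x) (states, rest)).1.length :=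
        foldScan_len ms t x (states, rest)
      have hphi' : (ms.foldl (scanStep t x) (states, rest)).2.length
          + 2 * ((allSL ms f).toFinset.card
              - (ms.foldl (scanStep t x) (states, rest)).1.length) ≤ fuel := by
        simp only [List.length_cons] at hphi
        omega
      have hW' : ∀ s' ∈ (ms.foldl (scanStep t x) (states, rest)).1,
          s' ∈ (ms.foldl (scanStep t x) (states, rest)).2 ∨
          ∀ t' y, edgeAdj ms s'.2 y t' → s'.1 ≤ t' →
            (t', y) ∈ (ms.foldl (scanStep t x) (states, rest)).1 := by
        intro s' hs'
        rcases foldScan_new_in_snd ms t x s' (states, rest) hs' with hold | hq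
        · rcases hW s' hold with hq | hcl
          · rcases List.mem_cons.mp hq with rfl | hq
            · refine Or.inr ?_
              intro t'' y' he' hle'
              refine (foldScan_fst_mem ms t x _ (states, rest)).mpr (Or.inr ?_)
              exact (ScanAdds_iff_succ ms t x t'' y').mpr ⟨he', hle'⟩
            · exact Or.inl (foldScan_snd_mono ms t x s' (states, rest) hq)
          · refine Or.inr ?_
            intro t'' y' he' hle'
            exact foldScan_fst_mono ms t x _ _ (hcl t'' y' he' hle')
        · exact Or.inl hq
      exact ih _ _ hphi' hnd' hsub' hqs' hW' s hsmem t' y he hle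

-- final characterisation of B's state set
theorem memB_iff (ms : List (Int × Int × Int)) (f : Int) (s : Int × Int) :
    s ∈ loopB ms (4 * ms.length + 6)
        (PySem.Set.ofList [((0 : Int), (0 : Int)), ((0 : Int), f)])
        [((0 : Int), (0 : Int)), ((0 : Int), f)] ↔ Good ms f s := by
  set states0 : PySem.Set (Int × Int) := PySem.Set.ofList [((0 : Int), (0 : Int)), ((0 : Int), f)]
    with hst0
  have hmem0 : ∀ q : Int × Int, q ∈ states0 ↔ (q = (0, 0) ∨ q = (0, f)) := by
    intro q
    rw [hst0, PySem.Set.mem_ofList]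
    simp
  constructor
  · intro hs
    refine loopB_sound ms f _ _ _ ?_ ?_ s hs
    · intro q hq
      rcases (hmem0 q).mp hq with rfl | rfl
      · exact Or.inl (RF.refl _)
      · exact Or.inr (RF.refl _)
    · intro q hq
      rcases List.mem_cons.mp hq with rfl | hq
      · exact Or.inl (RF.refl _)
      · rcases List.mem_cons.mp hq with rfl | hq
        · exact Or.inr (RF.refl _)
        · exact absurd hq (List.not_mem_nil)
  · intro hg
    have hcardle : (allSL ms f).toFinset.card ≤ 2 + 2 * ms.length := by
      have h1 := List.toFinset_card_le (allSL ms f)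
      have h2 : (allSL ms f).length = 2 + 2 * ms.length := by
        simp [allSL]
        omega
      omega
    have hphi : ([((0 : Int), (0 : Int)), ((0 : Int), f)] : List (Int × Int)).length
        + 2 * ((allSL ms f).toFinset.card - states0.length) ≤ 4 * ms.length + 6 := by
      simp only [List.length_cons, List.length_nil]
      omega
    have hnd : states0.Nodup := PySem.Set.nodup_ofList _
    have hsub : ∀ q ∈ states0, q ∈ allSL ms f := by
      intro q hq
      rcases (hmem0 q).mp hq with rfl | rfl <;> simp [allSL]
    have hqs : ∀ q ∈ ([((0 : Int), (0 : Int)), ((0 : Int), f)] : List (Int × Int)), q ∈ states0 := by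
      intro q hq
      rcases List.mem_cons.mp hq with rfl | hq
      · exact (hmem0 _).mpr (Or.inl rfl)
      · rcases List.mem_cons.mp hq with rfl | hq
        · exact (hmem0 _).mpr (Or.inr rfl)
        · exact absurd hq (List.not_mem_nil)
    have hW : ∀ s' ∈ states0, s' ∈ ([((0 : Int), (0 : Int)), ((0 : Int), f)] : List (Int × Int))
        ∨ ∀ t' y, edgeAdj ms s'.2 y t' → s'.1 ≤ t' → (t', y) ∈ states0 := by
      intro s' hs'
      rcases (hmem0 s').mp hs' with rfl | rfl
      · exact Or.inl (by simp)
      · exact Or.inl (by simp)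
    have hclosed := loopB_closed ms f (4 * ms.length + 6) states0 _ hphi hnd hsub hqs hW
    have hseed : ∀ q : Int × Int, q ∈ states0 →
        q ∈ loopB ms (4 * ms.length + 6) states0 [((0 : Int), (0 : Int)), ((0 : Int), f)] :=
      fun q hq => loopB_mono ms _ _ _ q hq
    have hRF : ∀ s0 u : Int × Int, RF ms s0 u →
        s0 ∈ loopB ms (4 * ms.length + 6) states0 [((0 : Int), (0 : Int)), ((0 : Int), f)] →
        u ∈ loopB ms (4 * ms.length + 6) states0 [((0 : Int), (0 : Int)), ((0 : Int), f)] := by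
      intro s0 u hrf
      induction hrf with
      | refl s => exact id
      | head e hle tail ih =>
        intro hs0
        exact ih (hclosed _ hs0 _ _ e hle)
    rcases hg with hg | hg
    · exact hRF _ _ hg (hseed _ ((hmem0 _).mpr (Or.inl rfl)))
    · exact hRF _ _ hg (hseed _ ((hmem0 _).mpr (Or.inr rfl)))

-- ===== VERDICT (by name: the statement is the Claim_ definition above) =====
theorem solution_spec : Claim_equal_solution := by
  intro n ms f _
  unfold Spec_solution solution solution_alt
  set resA := loopA (buildGraphA ms) (4 * ms.length + 3) (hpush (hpush [] (0, 0)) (0, f))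
    PySem.Set.empty with hra
  set stB := loopB ms (4 * ms.length + 6)
      (PySem.Set.ofList [((0 : Int), (0 : Int)), ((0 : Int), f)])
      [((0 : Int), (0 : Int)), ((0 : Int), f)] with hsb
  have hAmem : ∀ x, x ∈ resA ↔ ∃ t, Good ms f (t, x) := fun x => memA_iff ms f x
  have hBmem : ∀ x, x ∈ PySem.Set.ofList (stB.map (fun s => s.2)) ↔ ∃ t, Good ms f (t, x) := by
    intro x
    rw [PySem.Set.mem_ofList, List.mem_map]
    constructor
    · rintro ⟨s, hs, rfl⟩
      exact ⟨s.1, by simpa using (memB_iff ms f s).mp hs⟩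
    · rintro ⟨t, hg⟩
      exact ⟨(t, x), (memB_iff ms f (t, x)).mpr hg, rfl⟩
  have hAnd : resA.Nodup := loopA_nodup _ _ _ _ (by simp [PySem.Set.empty])
  have hBnd : (PySem.Set.ofList (stB.map (fun s => s.2))).Nodup := PySem.Set.nodup_ofList _
  have hperm : resA.Perm (PySem.Set.ofList (stB.map (fun s => s.2))) :=
    (List.perm_ext_iff_of_nodup hAnd hBnd).mpr (fun a => (hAmem a).trans (hBmem a).symm)
  exact PySem.List.sorted_eq_sorted_of_perm _ _ _ (fun a b h => h) hperm
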